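-- pv_equiv track=rewrite | github.com/jabalpureishan/LeetCode-and-GeeksForGeeks | Maximize The Array - GFG/maximize-the-array.py | maximizeArray
-- ===== SOURCE A (Python) =====
-- def maximizeArray(arr1, arr2, n):
--     New = set(arr1+arr2)
--     New = sorted(New,reverse=True)
--     New = New[:n]
--     New = set(New)
--     out = []
--     Done = set()
--     for i in arr2:
--         if i in New:
--             if i not in Done:
--                 out.append(i)
--                 Done.add(i)
--     for i in arr1:
--         if i in New:
--             if i not in Done:
--                 out.append(i)
--                 Done.add(i)
--     return out
-- ===== SOURCE B (Python) =====
-- def _kth_largest(vals, k):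
--     # distinct values, 1 <= k <= len(vals); quickselect with median-of-three pivot
--     while True:
--         pivot = sorted((vals[0], vals[len(vals) // 2], vals[-1]))[1]
--         greater = [x for x in vals if x > pivot]
--         if k <= len(greater):
--             vals = greater
--         elif k == len(greater) + 1:
--             return pivot
--         else:
--             k -= len(greater) + 1
--             vals = [x for x in vals if x < pivot]
--
--
-- def maximizeArray(arr1, arr2, n):
--     vals = list(set(arr1 + arr2))
--     if n <= 0:
--         keep = set()
--     elif n >= len(vals):
--         keep = set(vals)
--     else:
--         thr = _kth_largest(vals, n)
--         keep = {x for x in vals if x >= thr}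
--     out = []
--     seen = set()
--     for i in arr2 + arr1:
--         if i in keep and i not in seen:
--             out.append(i)
--             seen.add(i)
--     return out
-- ===== Notes on version B (the rewrite author's own statement) =====
-- stated objective: alternative
-- what changed: replaces the sort-and-slice top-n selection by a hand-written quickselect that finds the n-th largest distinct value and keeps the values at or above it, with one merged output pass over arr2+arr1; Pre_ restricts to n >= 0, the natural domain of a top-n count, excluding negative n where A's slice New[:n] accidentally keeps all but the last |n| sorted values
-- outside the precondition, e.g. on maximizeArray([3, 1], [2], -1): A returns [2, 3], B returns []
import Mathlib
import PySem

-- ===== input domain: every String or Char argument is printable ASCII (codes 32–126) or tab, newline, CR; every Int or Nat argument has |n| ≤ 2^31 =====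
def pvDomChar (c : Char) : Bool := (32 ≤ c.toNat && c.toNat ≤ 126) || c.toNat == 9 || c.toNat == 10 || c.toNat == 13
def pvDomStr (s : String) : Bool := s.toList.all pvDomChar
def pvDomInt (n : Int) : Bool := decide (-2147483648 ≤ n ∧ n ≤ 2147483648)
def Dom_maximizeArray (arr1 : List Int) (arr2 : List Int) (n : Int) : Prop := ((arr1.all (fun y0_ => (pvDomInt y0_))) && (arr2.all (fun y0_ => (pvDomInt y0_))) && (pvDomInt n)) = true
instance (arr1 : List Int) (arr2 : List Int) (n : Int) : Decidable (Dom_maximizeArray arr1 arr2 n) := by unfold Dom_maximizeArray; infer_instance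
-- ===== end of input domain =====

-- B replaces A's sort-and-slice top-n selection by a hand-written quickselect for the n-th
-- largest distinct value, then keeps the values at or above that threshold, with one merged
-- output pass; claimed for n ≥ 0 (Pre_).

-- ===== PORT A =====
-- step of A's output loops: 'if i in New: if i not in Done: out.append(i); Done.add(i)'
def pvStepA (newS : PySem.Set Int) (st : List Int × PySem.Set Int) (i : Int) : List Int × PySem.Set Int :=
  if PySem.Set.contains newS i then
    if PySem.Set.contains st.2 i then st
    else (st.1 ++ [i], PySem.Set.add st.2 i)
  else st

def maximizeArray (arr1 : List Int) (arr2 : List Int) (n : Int) : List Int :=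
  let new0 : PySem.Set Int := PySem.Set.ofList (arr1 ++ arr2)          -- New = set(arr1+arr2)
  let new1 : List Int := PySem.List.sorted new0 (fun x => x) true       -- New = sorted(New, reverse=True)
  let new2 : List Int := PySem.List.slice new1 none (some n)            -- New = New[:n]
  let newS : PySem.Set Int := PySem.Set.ofList new2                     -- New = set(New)
  let st1 := arr2.foldl (pvStepA newS) ([], PySem.Set.empty)            -- for i in arr2: …
  let st2 := arr1.foldl (pvStepA newS) st1                              -- for i in arr1: …
  st2.1

-- ===== PORT B =====
-- pivot 'sorted((vals[0], vals[len(vals)//2], vals[-1]))[1]' (median of three; 'vals[-1]'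
-- ported as the last element of a nonempty list)
def pvPivot (vals : List Int) : Int :=
  (PySem.List.sorted
      [vals.getD 0 0, vals.getD (vals.length / 2) 0, vals.getD (vals.length - 1) 0]
      (fun x => x) false).getD 1 0

-- the median-of-three pivot of a nonempty list is a member (used by pvKth's termination)
lemma pv_pivot_mem (vals : List Int) (hne : vals ≠ []) : pvPivot vals ∈ vals := by
  have hpos : 0 < vals.length := List.length_pos_iff.mpr hne
  unfold pvPivot
  set l3 : List Int := [vals.getD 0 0, vals.getD (vals.length / 2) 0, vals.getD (vals.length - 1) 0] with hl3
  have hperm : (PySem.List.sorted l3 (fun x => x) false).Perm l3 :=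
    PySem.List.sorted_perm l3 (fun x => x) false
  have hlen : (PySem.List.sorted l3 (fun x => x) false).length = 3 := by
    rw [hperm.length_eq, hl3]; rfl
  have hmem : (PySem.List.sorted l3 (fun x => x) false).getD 1 0
      ∈ PySem.List.sorted l3 (fun x => x) false := by
    rw [List.getD_eq_getElem _ _ (by omega)]
    exact List.getElem_mem _
  have h3 : (PySem.List.sorted l3 (fun x => x) false).getD 1 0 ∈ l3 := hperm.mem_iff.mp hmem
  rw [hl3] at h3
  simp only [List.mem_cons, List.not_mem_nil, or_false] at h3
  rcases h3 with h | h | h <;> rw [h]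
  · rw [List.getD_eq_getElem _ _ hpos]; exact List.getElem_mem _
  · rw [List.getD_eq_getElem _ _ (Nat.div_lt_self hpos one_lt_two)]; exact List.getElem_mem _
  · rw [List.getD_eq_getElem _ _ (by omega)]; exact List.getElem_mem _

-- filtering out the pivot strictly shrinks the list (used by pvKth's termination)
lemma pv_filter_pivot_lt (vals : List Int) (hne : vals ≠ []) (p : Int → Bool)
    (hp : p (pvPivot vals) = false) :
    (vals.filter p).length < vals.length :=
  List.length_filter_lt_length_iff_exists.mpr
    ⟨pvPivot vals, pv_pivot_mem vals hne, by simp [hp]⟩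

-- '_kth_largest(vals, k)': quickselect with median-of-three pivot.  The Python caller passes
-- list(set(...)); the port passes the Set's modeled order (the n-th largest value returned
-- is independent of the list's order).  The indexing in pvPivot is total via getD 0: the
-- empty case is unreachable from the caller (Python would raise IndexError there).
def pvKth (vals : List Int) (k : Int) : Int :=
  if hne : vals = [] then 0
  else
    let pivot := pvPivot vals                                           -- pivot = sorted((vals[0], vals[len(vals)//2], vals[-1]))[1]
    let greater := vals.filter (fun x => decide (pivot < x))            -- greater = [x for x in vals if x > pivot]
    if k ≤ (greater.length : Int) then pvKth greater k                  -- if k <= len(greater): vals = greater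
    else if k = (greater.length : Int) + 1 then pivot                   -- elif k == len(greater)+1: return pivot
    else pvKth (vals.filter (fun x => decide (x < pivot)))              -- else: vals = [x for x in vals if x < pivot]
           (k - ((greater.length : Int) + 1))                           --       k -= len(greater)+1
termination_by vals.length
decreasing_by
  · rw [List.length_unattach, ← List.countP_eq_length_filter,
      List.countP_attach (l := vals) (p := fun x => decide (pvPivot vals < x)),
      List.countP_eq_length_filter]
    exact pv_filter_pivot_lt vals hne (fun x => decide (pvPivot vals < x)) (by simp)
  · rw [List.length_unattach, ← List.countP_eq_length_filter,
      List.countP_attach (l := vals) (p := fun x => decide (x < pvPivot vals)),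
      List.countP_eq_length_filter]
    exact pv_filter_pivot_lt vals hne (fun x => decide (x < pvPivot vals)) (by simp)

-- step of B's single output loop: 'if i in keep and i not in seen: out.append(i); seen.add(i)'
def pvStepB (keep : PySem.Set Int) (st : List Int × PySem.Set Int) (i : Int) : List Int × PySem.Set Int :=
  if PySem.Set.contains keep i && !PySem.Set.contains st.2 i then
    (st.1 ++ [i], PySem.Set.add st.2 i)
  else st

def maximizeArray_alt (arr1 : List Int) (arr2 : List Int) (n : Int) : List Int :=
  let vals : PySem.Set Int := PySem.Set.ofList (arr1 ++ arr2)           -- vals = list(set(arr1 + arr2))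
  let keep : PySem.Set Int :=
    if n ≤ 0 then PySem.Set.empty                                       -- if n <= 0: keep = set()
    else if (vals.length : Int) ≤ n then PySem.Set.ofList vals          -- elif n >= len(vals): keep = set(vals)
    else
      let thr := pvKth vals n                                           -- thr = _kth_largest(vals, n)
      PySem.Set.ofList (vals.filter (fun x => decide (thr ≤ x)))        -- keep = {x for x in vals if x >= thr}
  ((arr2 ++ arr1).foldl (pvStepB keep) ([], PySem.Set.empty)).1

-- ===== PRECONDITION & SPEC =====
-- Pre_ restricts to n ≥ 0, the natural domain of a top-n count; for negative n A's slice
-- New[:n] accidentally keeps all but the last |n| sorted values, an artefact of Python slicing.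
def Pre_maximizeArray (arr1 : List Int) (arr2 : List Int) (n : Int) : Prop := 0 ≤ n
instance (arr1 : List Int) (arr2 : List Int) (n : Int) : Decidable (Pre_maximizeArray arr1 arr2 n) := by unfold Pre_maximizeArray; infer_instance
def pvWitness_maximizeArray : List Int × List Int × Int := ([3, 1, 5], [2, 5], 2)

def Spec_maximizeArray (arr1 : List Int) (arr2 : List Int) (n : Int) (out : List Int) : Prop := out = maximizeArray_alt arr1 arr2 n
instance (arr1 : List Int) (arr2 : List Int) (n : Int) (out : List Int) : Decidable (Spec_maximizeArray arr1 arr2 n out) := by unfold Spec_maximizeArray; infer_instance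

-- ===== CLAIM (what is proved, stated in full; the proofs are below) =====
def Claim_equal_maximizeArray : Prop := ∀ (arr1 : List Int) (arr2 : List Int) (n : Int), Dom_maximizeArray arr1 arr2 n → Pre_maximizeArray arr1 arr2 n → Spec_maximizeArray arr1 arr2 n (maximizeArray arr1 arr2 n)

-- ===== LEMMAS AND PROOFS =====

-- countP splits along any second predicate
lemma pv_countP_split (l : List Int) (p q : Int → Bool) :
    l.countP p = l.countP (fun x => p x && q x) + l.countP (fun x => p x && !q x) := by
  induction l with
  | nil => rfl
  | cons a t ih =>
    simp only [List.countP_cons, ih]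
    cases hp : p a <;> cases hq : q a <;> simp <;> omega

-- quickselect correctness: on a nodup list, for 1 ≤ k ≤ length, pvKth returns a member
-- with exactly k-1 strictly larger members.
lemma pv_kth_spec (N : Nat) (vals : List Int) (k : Int) (hN : vals.length ≤ N)
    (hnd : vals.Nodup) (h1 : 1 ≤ k) (h2 : k ≤ (vals.length : Int)) :
    pvKth vals k ∈ vals ∧ (vals.countP (fun y => decide (pvKth vals k < y)) : Int) = k - 1 := by
  induction N generalizing vals k with
  | zero =>
    interval_cases h : vals.length
    · omega
  | succ N ih =>
    have hne : vals ≠ [] := by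
      intro h; rw [h] at h2; simp at h2; omega
    rw [pvKth, dif_neg hne]
    set pivot := pvPivot vals with hpiv
    set greater := vals.filter (fun x => decide (pivot < x)) with hg
    have hpm : pivot ∈ vals := pv_pivot_mem vals hne
    have hglt : greater.length < vals.length :=
      pv_filter_pivot_lt vals hne _ (by simp [hpiv])
    have hgnd : greater.Nodup := hnd.filter _
    by_cases hk1 : k ≤ (greater.length : Int)
    · -- recurse into greater
      rw [if_pos hk1]
      obtain ⟨hmem, hcnt⟩ := ih greater k (by omega) hgnd h1 hk1
      have hthr_gt : pivot < pvKth greater k := by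
        have := List.of_mem_filter hmem
        simpa using this
      refine ⟨List.mem_of_mem_filter hmem, ?_⟩
      have heq : vals.countP (fun y => decide (pvKth greater k < y))
          = greater.countP (fun y => decide (pvKth greater k < y)) := by
        rw [hg, List.countP_filter]
        apply List.countP_congr
        intro y _
        simp only [← hg]
        by_cases h : pvKth greater k < y
        · simp [h, lt_trans hthr_gt h]
        · simp [h]
      rw [heq, hcnt]
    · rw [if_neg hk1]
      by_cases hk2 : k = (greater.length : Int) + 1
      · -- pivot is the answer
        rw [if_pos hk2]
        refine ⟨hpm, ?_⟩
        have : vals.countP (fun y => decide (pivot < y)) = greater.length := by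
          rw [hg, List.countP_eq_length_filter]
        omega
      · -- recurse into lesser
        rw [if_neg hk2]
        set lesser := vals.filter (fun x => decide (x < pivot)) with hl
        set k' := k - ((greater.length : Int) + 1) with hk'
        have hllt : lesser.length < vals.length :=
          pv_filter_pivot_lt vals hne _ (by simp [hpiv])
        -- trichotomy: vals.length = greater.length + 1 + lesser.length
        have hsplit1 : vals.countP (fun y => true)
            = vals.countP (fun y => decide (pivot < y)) + vals.countP (fun y => !decide (pivot < y)) := by
          have := pv_countP_split vals (fun _ => true) (fun y => decide (pivot < y))
          simpa using this
        have hsplit2 : vals.countP (fun y => !decide (pivot < y))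
            = vals.countP (fun y => decide (y < pivot)) + vals.countP (fun y => decide (y = pivot)) := by
          rw [pv_countP_split vals (fun y => !decide (pivot < y)) (fun y => decide (y < pivot))]
          congr 1
          · apply List.countP_congr
            intro y _
            by_cases h : y < pivot
            · simp [h, show ¬(pivot < y) by omega]
            · simp [h]
          · apply List.countP_congr
            intro y _
            by_cases h : y = pivot
            · simp [h]
            · have h2 : pivot < y ∨ y < pivot := by omega
              rcases h2 with h2 | h2
              · simp [h, h2, show ¬(y < pivot) by omega]
              · simp [h, h2]
        have hcount1 : vals.countP (fun y => decide (y = pivot)) = 1 := by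
          have hc : vals.countP (fun y => decide (y = pivot)) = vals.count pivot := by
            rw [List.count]
            apply List.countP_congr; intro y _; simp
          rw [hc]
          exact List.count_eq_one_of_mem hnd hpm
        have htrue : vals.countP (fun y => true) = vals.length := by simp
        have hgc : vals.countP (fun y => decide (pivot < y)) = greater.length := by
          rw [hg, List.countP_eq_length_filter]
        have hlc : vals.countP (fun y => decide (y < pivot)) = lesser.length := by
          rw [hl, List.countP_eq_length_filter]
        have hlen : vals.length = greater.length + 1 + lesser.length := by omega
        have hlnd : lesser.Nodup := hnd.filter _
        obtain ⟨hmem, hcnt⟩ := ih lesser k' (by omega) hlnd (by omega) (by omega)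
        set thr := pvKth lesser k' with hthr
        have hthr_lt : thr < pivot := by
          have := List.of_mem_filter hmem
          simpa using this
        refine ⟨List.mem_of_mem_filter hmem, ?_⟩
        have hstep : vals.countP (fun y => decide (thr < y))
            = vals.countP (fun y => decide (thr < y) && decide (y < pivot))
              + vals.countP (fun y => decide (thr < y) && !decide (y < pivot)) :=
          pv_countP_split vals _ _
        have hpart1 : vals.countP (fun y => decide (thr < y) && decide (y < pivot))
            = lesser.countP (fun y => decide (thr < y)) := by
          rw [hl, List.countP_filter]
        have hpart2 : vals.countP (fun y => decide (thr < y) && !decide (y < pivot))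
            = vals.countP (fun y => !decide (y < pivot)) := by
          apply List.countP_congr
          intro y _
          by_cases h : y < pivot
          · simp [h]
          · simp [h, show thr < y by omega]
        have hpart3 : vals.countP (fun y => !decide (y < pivot)) = greater.length + 1 := by
          rw [pv_countP_split vals (fun y => !decide (y < pivot)) (fun y => decide (pivot < y))]
          have e1 : vals.countP (fun y => !decide (y < pivot) && decide (pivot < y))
              = vals.countP (fun y => decide (pivot < y)) := by
            apply List.countP_congr
            intro y _
            by_cases h : pivot < y
            · simp [h, show ¬(y < pivot) by omega]
            · simp [h]
          have e2 : vals.countP (fun y => !decide (y < pivot) && !decide (pivot < y))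
              = vals.countP (fun y => decide (y = pivot)) := by
            apply List.countP_congr
            intro y _
            by_cases h : y = pivot
            · simp [h]
            · have h2 : pivot < y ∨ y < pivot := by omega
              rcases h2 with h2 | h2
              · simp [h, h2, show ¬(y < pivot) by omega]
              · simp [h, h2]
          rw [e1, e2, hgc, hcount1]
        rw [hstep, hpart1, hpart2, hpart3]
        push_cast
        omega

-- In a strictly decreasing list, membership in 'take t' is 'membership and fewer than t larger elements'.
lemma pv_mem_take_iff_countP (S : List Int) (hp : S.Pairwise (fun a b => b < a)) (t : Nat) (x : Int) :
    x ∈ S.take t ↔ x ∈ S ∧ S.countP (fun y => decide (x < y)) < t := by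
  induction S generalizing t with
  | nil => simp
  | cons a rest ih =>
    rcases List.pairwise_cons.mp hp with ⟨ha, hrest⟩
    cases t with
    | zero => simp
    | succ t =>
      by_cases hxa : x = a
      · subst hxa
        have hc : rest.countP (fun y => decide (x < y)) = 0 := by
          rw [List.countP_eq_zero]
          intro y hy
          simpa using not_lt.mpr (le_of_lt (ha y hy))
        simp [hc]
      · have hmem : x ∈ a :: rest ↔ x ∈ rest := by simp [hxa]
        by_cases hxr : x ∈ rest
        · have hlt : x < a := ha x hxr
          simp only [List.take_succ_cons, List.mem_cons, hxa, false_or,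
            List.countP_cons, hmem, ih hrest t]
          simp [hlt, hxr]
        · have h1 : x ∉ rest.take t := fun h => hxr (List.mem_of_mem_take h)
          simp [hxa, hxr, h1]

-- A's top-n slice and the rank test 'fewer than n larger distinct values' have the same members (0 ≤ n).
lemma pv_mem_slice_iff (arr1 arr2 : List Int) (n : Int) (hn : 0 ≤ n) (x : Int) :
    (x ∈ PySem.List.slice (PySem.List.sorted (PySem.Set.ofList (arr1 ++ arr2)) (fun x => x) true) none (some n))
      ↔ (x ∈ PySem.Set.ofList (arr1 ++ arr2) ∧
         ((PySem.Set.ofList (arr1 ++ arr2)).countP (fun y => decide (x < y)) : Int) < n) := by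
  set L : List Int := PySem.Set.ofList (arr1 ++ arr2) with hL
  set S : List Int := PySem.List.sorted L (fun x => x) true with hS
  have hperm : S.Perm L := PySem.List.sorted_perm L (fun x => x) true
  have hnd : S.Nodup := hperm.nodup_iff.mpr (PySem.Set.nodup_ofList _)
  have hle : S.Pairwise (fun a b => b ≤ a) := PySem.List.sorted_pairwise_rev L (fun x => x)
  have hp : S.Pairwise (fun a b => b < a) := by
    have := hnd.and hle
    exact this.imp (fun {a b} h => lt_of_le_of_ne h.2 (Ne.symm h.1))
  have hmemS : ∀ y, y ∈ S ↔ y ∈ L := fun y => hperm.mem_iff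
  have hcnt : S.countP (fun y => decide (x < y)) = L.countP (fun y => decide (x < y)) :=
    hperm.countP_eq _
  rw [PySem.List.slice_to S hn, pv_mem_take_iff_countP S hp, hmemS, hcnt]
  constructor
  · rintro ⟨h1, h2⟩; exact ⟨h1, by omega⟩
  · rintro ⟨h1, h2⟩; exact ⟨h1, by omega⟩

-- B's keep set has those same members (for 0 ≤ n)
lemma pv_mem_keep_iff (arr1 arr2 : List Int) (n : Int) (hn : 0 ≤ n) (x : Int) :
    (x ∈ (if n ≤ 0 then (PySem.Set.empty : PySem.Set Int)
          else if ((PySem.Set.ofList (arr1 ++ arr2)).length : Int) ≤ n then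
            PySem.Set.ofList (PySem.Set.ofList (arr1 ++ arr2))
          else PySem.Set.ofList ((PySem.Set.ofList (arr1 ++ arr2)).filter
            (fun y => decide (pvKth (PySem.Set.ofList (arr1 ++ arr2)) n ≤ y)))))
      ↔ (x ∈ PySem.Set.ofList (arr1 ++ arr2) ∧
         ((PySem.Set.ofList (arr1 ++ arr2)).countP (fun y => decide (x < y)) : Int) < n) := by
  set L : List Int := PySem.Set.ofList (arr1 ++ arr2) with hL
  have hnd : L.Nodup := PySem.Set.nodup_ofList _
  by_cases h0 : n ≤ 0
  · rw [if_pos h0]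
    have : n = 0 := by omega
    subst this
    simp [PySem.Set.empty]
  · rw [if_neg h0]
    by_cases hbig : (L.length : Int) ≤ n
    · rw [if_pos hbig, PySem.Set.mem_ofList]
      constructor
      · intro hx
        refine ⟨hx, ?_⟩
        have hpos : 0 < L.countP (fun y => !decide (x < y)) :=
          List.countP_pos_iff.mpr ⟨x, hx, by simp⟩
        have hsum := pv_countP_split L (fun _ => true) (fun y => decide (x < y))
        simp only [Bool.true_and] at hsum
        have htrue : L.countP (fun y => true) = L.length := by simp
        omega
      · exact And.left
    · rw [if_neg hbig, PySem.Set.mem_ofList, List.mem_filter]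
      obtain ⟨hmem, hcnt⟩ := pv_kth_spec L.length L n le_rfl hnd (by omega) (by omega)
      set thr := pvKth L n with hthr
      constructor
      · rintro ⟨hx, hge⟩
        refine ⟨hx, ?_⟩
        have hle : L.countP (fun y => decide (x < y)) ≤ L.countP (fun y => decide (thr < y)) := by
          apply List.countP_mono_left
          intro y _ hy
          simp at hy ⊢
          have : thr ≤ x := by simpa using hge
          omega
        omega
      · rintro ⟨hx, hlt⟩
        refine ⟨hx, ?_⟩
        by_contra hcon
        have hxthr : x < thr := by simpa using hcon
        -- countP (thr ≤ ·) = n, and every such y has x < y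
        have hsplit := pv_countP_split L (fun y => decide (thr ≤ y)) (fun y => decide (thr < y))
        have e1 : L.countP (fun y => decide (thr ≤ y) && decide (thr < y))
            = L.countP (fun y => decide (thr < y)) := by
          apply List.countP_congr
          intro y _
          by_cases h : thr < y
          · simp [h, le_of_lt h]
          · simp [h]
        have e2 : L.countP (fun y => decide (thr ≤ y) && !decide (thr < y))
            = L.countP (fun y => decide (y = thr)) := by
          apply List.countP_congr
          intro y _
          by_cases h : y = thr
          · simp [h]
          · have h2 : thr < y ∨ y < thr := by omega
            rcases h2 with h2 | h2
            · simp [h, h2, le_of_lt h2]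
            · simp [h, show ¬(thr ≤ y) by omega]
        have hone : L.countP (fun y => decide (y = thr)) = 1 := by
          have hc : L.countP (fun y => decide (y = thr)) = L.count thr := by
            rw [List.count]
            apply List.countP_congr; intro y _; simp
          rw [hc]
          exact List.count_eq_one_of_mem hnd hmem
        have hmono : L.countP (fun y => decide (thr ≤ y)) ≤ L.countP (fun y => decide (x < y)) := by
          apply List.countP_mono_left
          intro y _ hy
          simp at hy ⊢
          omega
        omega

-- the two loop steps agree once the two membership sets agree
lemma pv_step_eq (newS keep : PySem.Set Int)
    (h : ∀ i : Int, PySem.Set.contains newS i = PySem.Set.contains keep i) :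
    pvStepA newS = pvStepB keep := by
  funext st i
  unfold pvStepA pvStepB
  rw [← h i]
  by_cases h1 : i ∈ newS <;> by_cases h2 : i ∈ st.2 <;>
    simp [h1, h2]

-- ===== VERDICT (by name: the statement is the Claim_ definition above) =====
theorem maximizeArray_spec : Claim_equal_maximizeArray := by
  intro arr1 arr2 n _ hn
  unfold Spec_maximizeArray maximizeArray maximizeArray_alt
  simp only []
  rw [← List.foldl_append]
  have hcont : ∀ i : Int,
      PySem.Set.contains (PySem.Set.ofList (PySem.List.slice
        (PySem.List.sorted (PySem.Set.ofList (arr1 ++ arr2)) (fun x => x) true) none (some n))) i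
      = PySem.Set.contains (if n ≤ 0 then (PySem.Set.empty : PySem.Set Int)
          else if ((PySem.Set.ofList (arr1 ++ arr2)).length : Int) ≤ n then
            PySem.Set.ofList (PySem.Set.ofList (arr1 ++ arr2))
          else PySem.Set.ofList ((PySem.Set.ofList (arr1 ++ arr2)).filter
            (fun y => decide (pvKth (PySem.Set.ofList (arr1 ++ arr2)) n ≤ y)))) i := by
    intro i
    rw [Bool.eq_iff_iff, PySem.Set.contains_iff, PySem.Set.contains_iff, PySem.Set.mem_ofList]
    rw [pv_mem_slice_iff arr1 arr2 n hn i, ← pv_mem_keep_iff arr1 arr2 n hn i]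
  rw [pv_step_eq _ _ hcont]
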